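-- pv_equiv track=rewrite | github.com/DutchVandaline/NER_Project | Spanning_WorkStation/train_working.py | assign_span_labels
-- ===== SOURCE A (Python) =====
-- def assign_span_labels(candidate_spans, true_spans):
--     """
--     각 후보 span에 대해, 실제 true span과 정확히 일치하면 해당 개체 타입(tag)을,
--     아니면 "O"를 라벨로 반환.
--     """
--     labels = []
--     true_span_dict = {(s, e): tag for s, e, tag in true_spans}
--     for span in candidate_spans:
--         if span in true_span_dict:
--             labels.append(true_span_dict[span])
--         else:
--             labels.append("O")
--     return labels
-- ===== SOURCE B (Python) =====
-- def assign_span_labels(candidate_spans, true_spans):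
--     # Scatter approach: pre-size the output with "O", index candidate positions,
--     # then write each true span's tag into all matching positions (later writes win).
--     labels = ["O"] * len(candidate_spans)
--     positions = {}
--     for i, span in enumerate(candidate_spans):
--         positions.setdefault(span, []).append(i)
--     for s, e, tag in true_spans:
--         for i in positions.get((s, e), []):
--             labels[i] = tag
--     return labels
-- ===== Notes on version B (the rewrite author's own statement) =====
-- stated objective: alternative
-- what changed: Inverts the traversal: instead of building a span->tag dict and looking each candidate up, B pre-fills an 'O' output array, indexes candidate positions, and scatters each true span's tag into the matching positions (later true spans overwrite, matching dict last-key-wins).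
import Mathlib
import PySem

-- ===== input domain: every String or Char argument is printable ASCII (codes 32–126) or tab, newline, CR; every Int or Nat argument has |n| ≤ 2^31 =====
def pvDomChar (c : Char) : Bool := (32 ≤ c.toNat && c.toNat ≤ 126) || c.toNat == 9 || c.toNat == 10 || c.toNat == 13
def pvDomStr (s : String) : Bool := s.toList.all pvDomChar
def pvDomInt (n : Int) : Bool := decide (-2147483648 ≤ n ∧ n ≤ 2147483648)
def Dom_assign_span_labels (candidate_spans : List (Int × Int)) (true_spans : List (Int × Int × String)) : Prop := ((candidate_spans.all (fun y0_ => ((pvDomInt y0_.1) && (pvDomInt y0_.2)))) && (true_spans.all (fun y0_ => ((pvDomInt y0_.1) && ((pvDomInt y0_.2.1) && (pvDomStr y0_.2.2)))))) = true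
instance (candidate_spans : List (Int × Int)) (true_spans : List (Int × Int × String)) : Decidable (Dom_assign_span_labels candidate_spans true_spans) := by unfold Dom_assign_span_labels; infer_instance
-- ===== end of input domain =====

-- B inverts the traversal: pre-filled "O" output array, a positions index over the candidates,
-- and a scatter of each true span's tag into the matching positions (alternative decomposition, same result).


-- ===== PORT A =====
def assign_span_labels (candidate_spans : List (Int × Int)) (true_spans : List (Int × Int × String)) : List String :=
  let true_span_dict : PySem.Dict (Int × Int) String :=
    true_spans.foldl (fun d t => d.insert (t.1, t.2.1) t.2.2) PySem.Dict.empty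
  candidate_spans.foldl
    (fun labels span =>
      if true_span_dict.contains span then
        labels ++ [true_span_dict.getD span "O"]
      else
        labels ++ ["O"])
    []

-- ===== PORT B =====
-- positions = {}; for i, span in enumerate(candidate_spans): positions.setdefault(span, []).append(i)
-- (setdefault-then-append = insert of the extended list: existing keys keep their position, new keys append)
def pvPositions (candidate_spans : List (Int × Int)) : PySem.Dict (Int × Int) (List Nat) :=
  candidate_spans.zipIdx.foldl
    (fun d p => d.insert p.1 (d.getD p.1 [] ++ [p.2])) PySem.Dict.empty

def assign_span_labels_alt (candidate_spans : List (Int × Int)) (true_spans : List (Int × Int × String)) : List String :=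
  let labels0 : List String := List.replicate candidate_spans.length "O"
  let positions := pvPositions candidate_spans
  true_spans.foldl
    (fun labels t =>
      (positions.getD (t.1, t.2.1) []).foldl (fun ls i => ls.set i t.2.2) labels)
    labels0

-- ===== PRECONDITION & SPEC =====
def Spec_assign_span_labels (candidate_spans : List (Int × Int)) (true_spans : List (Int × Int × String)) (out : List String) : Prop := out = assign_span_labels_alt candidate_spans true_spans
instance (candidate_spans : List (Int × Int)) (true_spans : List (Int × Int × String)) (out : List String) : Decidable (Spec_assign_span_labels candidate_spans true_spans out) := by unfold Spec_assign_span_labels; infer_instance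

-- ===== CLAIM (what is proved, stated in full; the proofs are below) =====
def Claim_equal_assign_span_labels : Prop := ∀ (candidate_spans : List (Int × Int)) (true_spans : List (Int × Int × String)), Dom_assign_span_labels candidate_spans true_spans → Spec_assign_span_labels candidate_spans true_spans (assign_span_labels candidate_spans true_spans)

-- ===== LEMMAS AND PROOFS =====

-- the last-match-wins label both programs compute for one candidate span
def lastMatch (true_spans : List (Int × Int × String)) (k : Int × Int) : String :=
  true_spans.foldl (fun label t => if (t.1, t.2.1) = k then t.2.2 else label) "O"

-- ---------- A side: A = map lastMatch ----------

theorem dict_lookup_eq_scan (ts : List (Int × Int × String)) (d : PySem.Dict (Int × Int) String)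
    (k : Int × Int) (v : String) :
    (ts.foldl (fun d t => d.insert (t.1, t.2.1) t.2.2) d).getD k v
      = ts.foldl (fun label t => if (t.1, t.2.1) = k then t.2.2 else label) (d.getD k v) := by
  induction ts generalizing d with
  | nil => rfl
  | cons t rest ih =>
      simp only [List.foldl_cons]
      rw [ih, PySem.Dict.getD_insert]
      by_cases h : (t.1, t.2.1) = k
      · rw [if_pos h.symm, if_pos h]
      · rw [if_neg (fun hh => h hh.symm), if_neg h]

theorem per_span (ts : List (Int × Int × String)) (k : Int × Int) :
    (if (ts.foldl (fun d t => d.insert (t.1, t.2.1) t.2.2) (PySem.Dict.empty : PySem.Dict (Int × Int) String)).contains k then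
       (ts.foldl (fun d t => d.insert (t.1, t.2.1) t.2.2) (PySem.Dict.empty : PySem.Dict (Int × Int) String)).getD k "O"
     else "O")
      = lastMatch ts k := by
  have hd := dict_lookup_eq_scan ts PySem.Dict.empty k "O"
  rw [PySem.Dict.getD_empty] at hd
  unfold lastMatch
  rw [← hd]
  by_cases h : (ts.foldl (fun d t => d.insert (t.1, t.2.1) t.2.2) (PySem.Dict.empty : PySem.Dict (Int × Int) String)).contains k = true
  · rw [if_pos h]
  · simp only [Bool.not_eq_true] at h
    rw [PySem.Dict.getD_of_not_contains (h := h), if_neg (by simp [h])]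

theorem foldl_append_map {α β : Type} (f : α → β) (xs : List α) (acc : List β) :
    xs.foldl (fun ls k => ls ++ [f k]) acc = acc ++ xs.map f := by
  induction xs generalizing acc with
  | nil => simp
  | cons x rest ih => simp [ih]

theorem a_eq_map (cs : List (Int × Int)) (ts : List (Int × Int × String)) :
    assign_span_labels cs ts = cs.map (lastMatch ts) := by
  unfold assign_span_labels
  have : ∀ labels span,
      (if (ts.foldl (fun d t => d.insert (t.1, t.2.1) t.2.2) (PySem.Dict.empty : PySem.Dict (Int × Int) String)).contains span then
         labels ++ [(ts.foldl (fun d t => d.insert (t.1, t.2.1) t.2.2) (PySem.Dict.empty : PySem.Dict (Int × Int) String)).getD span "O"]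
       else labels ++ ["O"]) = labels ++ [lastMatch ts span] := by
    intro labels span
    rw [← per_span ts span]
    by_cases h : (ts.foldl (fun d t => d.insert (t.1, t.2.1) t.2.2) (PySem.Dict.empty : PySem.Dict (Int × Int) String)).contains span = true
    · rw [if_pos h, if_pos h]
    · rw [if_neg (by simp [h]), if_neg (by simp [h])]
  simp only [this]
  exact foldl_append_map (lastMatch ts) cs []

-- ---------- B side: the positions index ----------

-- membership in the positions list characterises the candidate at that index
theorem mem_positions (cs : List (Int × Int)) (k : Int × Int) (j : Nat) :
    j ∈ (pvPositions cs).getD k [] ↔ cs[j]? = some k := by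
  induction cs using List.reverseRecOn with
  | nil => simp [pvPositions, PySem.Dict.getD_empty]
  | append_singleton cs x ih =>
      unfold pvPositions at *
      rw [List.zipIdx_append, List.foldl_append]
      simp only [List.zipIdx, List.foldl_cons, List.foldl_nil, Nat.zero_add]
      rw [PySem.Dict.getD_insert]
      by_cases hk : k = x
      · subst hk
        rw [if_pos rfl]
        simp only [List.mem_append, List.mem_singleton, ih]
        constructor
        · rintro (h | h)
          · have hj : j < cs.length := (List.getElem?_eq_some_iff.mp h).1
            rw [List.getElem?_append_left hj]; exact h
          · subst h
            rw [List.getElem?_append_right (le_refl _)]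
            simp
        · intro h
          by_cases hj : j < cs.length
          · left; rwa [List.getElem?_append_left hj] at h
          · right
            have hj' : cs.length ≤ j := Nat.le_of_not_lt hj
            rw [List.getElem?_append_right hj'] at h
            rcases Nat.lt_or_ge (j - cs.length) 1 with hlt | hge
            · omega
            · rw [List.getElem?_eq_none (by simpa using hge)] at h; exact absurd h (by simp)
      · rw [if_neg hk, ih]
        by_cases hj : j < cs.length
        · rw [List.getElem?_append_left hj]
        · have hj' : cs.length ≤ j := Nat.le_of_not_lt hj
          rw [List.getElem?_eq_none (by omega), List.getElem?_append_right hj']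
          rcases Nat.lt_or_ge (j - cs.length) 1 with hlt | hge
          · have : j - cs.length = 0 := by omega
            rw [this]
            simp only [List.getElem?_cons_zero]
            constructor
            · intro h; cases h
            · intro h; exact absurd (Option.some.inj h).symm hk
          · rw [List.getElem?_eq_none (by simpa using hge)]

-- a fold of set over an index list, read back at position j
theorem set_fold_getElem? (idxs : List Nat) (tag : String) (ls : List String) (j : Nat) :
    (idxs.foldl (fun ls i => ls.set i tag) ls)[j]?
      = if j ∈ idxs ∧ j < ls.length then some tag else ls[j]? := by
  induction idxs generalizing ls with
  | nil => simp
  | cons i0 rest ih =>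
      simp only [List.foldl_cons]
      rw [ih]
      simp only [List.length_set]
      by_cases hj : j < ls.length
      · by_cases hmem : j ∈ rest
        · simp [hmem, hj]
        · by_cases h0 : i0 = j
          · subst h0; simp [hmem, hj]
          · have h0' : ¬ j = i0 := fun h => h0 h.symm
            simp [hmem, hj, h0, h0']
      · have hnone : ls[j]? = none := List.getElem?_eq_none (Nat.le_of_not_lt hj)
        have hnone' : (ls.set i0 tag)[j]? = none := by
          rw [List.getElem?_set]
          split_ifs with h1 h2
          · omega
          · rfl
          · exact hnone
        simp [hj]

theorem set_fold_length (idxs : List Nat) (tag : String) (ls : List String) :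
    (idxs.foldl (fun ls i => ls.set i tag) ls).length = ls.length := by
  induction idxs generalizing ls with
  | nil => rfl
  | cons i0 rest ih => simp [List.foldl_cons, ih]

theorem b_fold_length (cs : List (Int × Int)) (ts : List (Int × Int × String)) :
    (ts.foldl (fun labels t => ((pvPositions cs).getD (t.1, t.2.1) []).foldl (fun ls i => ls.set i t.2.2) labels)
      (List.replicate cs.length "O")).length = cs.length := by
  induction ts using List.reverseRecOn with
  | nil => simp
  | append_singleton ts t ih => rw [List.foldl_append, List.foldl_cons, List.foldl_nil, set_fold_length, ih]

theorem b_fold_getElem? (cs : List (Int × Int)) (ts : List (Int × Int × String)) (j : Nat) :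
    (ts.foldl (fun labels t => ((pvPositions cs).getD (t.1, t.2.1) []).foldl (fun ls i => ls.set i t.2.2) labels)
      (List.replicate cs.length "O"))[j]? = (cs[j]?).map (lastMatch ts) := by
  induction ts using List.reverseRecOn with
  | nil =>
      simp only [List.foldl_nil, List.getElem?_replicate]
      by_cases hj : j < cs.length
      · rw [if_pos hj, (List.getElem?_eq_getElem hj)]; rfl
      · rw [if_neg hj, List.getElem?_eq_none (Nat.le_of_not_lt hj)]; rfl
  | append_singleton ts t ih =>
      rw [List.foldl_append, List.foldl_cons, List.foldl_nil, set_fold_getElem?, b_fold_length, ih]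
      by_cases hj : cs[j]? = some (t.1, t.2.1)
      · have hlt : j < cs.length := (List.getElem?_eq_some_iff.mp hj).1
        rw [if_pos ⟨(mem_positions cs _ j).mpr hj, hlt⟩, hj]
        simp [lastMatch]
      · rw [if_neg (fun h => hj ((mem_positions cs _ j).mp h.1))]
        cases h : cs[j]? with
        | none => rfl
        | some k =>
            have hne : (t.1, t.2.1) ≠ k := fun he => hj (by rw [h, he])
            simp [lastMatch, hne]

theorem full_eq (cs : List (Int × Int)) (ts : List (Int × Int × String)) :
    assign_span_labels cs ts = assign_span_labels_alt cs ts := by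
  rw [a_eq_map]
  unfold assign_span_labels_alt
  apply List.ext_getElem?
  intro j
  rw [b_fold_getElem? cs ts j, List.getElem?_map]

-- ===== VERDICT (by name: the statement is the Claim_ definition above) =====
theorem assign_span_labels_spec : Claim_equal_assign_span_labels := by
  intro cs ts _
  exact full_eq cs ts
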